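-- pv_equiv track=rewrite | github.com/isabellarhee/15-112 | week 10/hw10.py | hasAdjacentValues
-- ===== SOURCE A (Python) =====
-- def hasAdjacentValues(L):
--     '''
--     takes a list L of N integers, returns True if (v-1) or (v+1), or both,
--     are also in L, O(n) time
--     '''
--     S = set(L)  #get rid of repeats  #O(n)
--
--     for num in S:  #O(n)
--         temp1 = num - 1  #adjacent numbers to check
--         temp2 = num + 1
--         if temp1 in S or temp2 in S: #O(1)
--             return True
--
--     return False
-- ===== SOURCE B (Python) =====
-- def hasAdjacentValues(L):
--     vals = sorted(set(L))
--     for a, b in zip(vals, vals[1:]):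
--         if b - a == 1:
--             return True
--     return False
-- ===== Notes on version B (the rewrite author's own statement) =====
-- stated objective: alternative
-- what changed: Replaces per-element set-membership probing of num-1/num+1 with sorting the distinct values once and scanning consecutive pairs for a difference of 1.
import Mathlib
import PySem

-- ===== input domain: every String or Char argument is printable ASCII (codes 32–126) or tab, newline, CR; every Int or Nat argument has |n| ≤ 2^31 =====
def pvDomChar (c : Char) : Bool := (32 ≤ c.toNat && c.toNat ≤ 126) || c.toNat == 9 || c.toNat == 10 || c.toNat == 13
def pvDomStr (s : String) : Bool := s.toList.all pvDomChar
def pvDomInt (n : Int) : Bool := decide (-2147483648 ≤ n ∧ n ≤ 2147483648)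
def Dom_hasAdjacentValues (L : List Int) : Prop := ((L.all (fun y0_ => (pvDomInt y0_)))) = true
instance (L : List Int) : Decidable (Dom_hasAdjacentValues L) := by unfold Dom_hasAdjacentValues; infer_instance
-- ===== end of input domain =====

-- B replaces A's per-element set probing with sort-distinct-then-adjacent-difference scan (alternative decomposition, same result).

-- ===== PORT A =====
-- for num in S: if (num-1) in S or (num+1) in S: return True — order-independent (any hit returns True)
def hasAdjacentValues (L : List Int) : Bool :=
  let S := PySem.Set.ofList L
  S.any (fun num =>
    let temp1 := num - 1
    let temp2 := num + 1
    PySem.Set.contains S temp1 || PySem.Set.contains S temp2)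

-- ===== PORT B =====
-- for a, b in zip(vals, vals[1:]): if b - a == 1: return True
def pvAdjScan : List (Int × Int) → Bool
  | [] => false
  | (a, b) :: rest => if b - a == 1 then true else pvAdjScan rest

def hasAdjacentValues_alt (L : List Int) : Bool :=
  let vals := PySem.List.sorted (PySem.Set.ofList L) (fun x => x) false
  pvAdjScan (vals.zip (PySem.List.slice vals (some 1) none))

-- ===== PRECONDITION & SPEC =====
def Spec_hasAdjacentValues (L : List Int) (out : Bool) : Prop := out = hasAdjacentValues_alt L
instance (L : List Int) (out : Bool) : Decidable (Spec_hasAdjacentValues L out) := by unfold Spec_hasAdjacentValues; infer_instance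

-- ===== CLAIM (what is proved, stated in full; the proofs are below) =====
def Claim_equal_hasAdjacentValues : Prop := ∀ (L : List Int), Dom_hasAdjacentValues L → Spec_hasAdjacentValues L (hasAdjacentValues L)

-- ===== LEMMAS AND PROOFS =====

-- A's side is true iff some value has a successor in L
theorem portA_iff (L : List Int) :
    hasAdjacentValues L = true ↔ ∃ a, a ∈ L ∧ a + 1 ∈ L := by
  simp only [hasAdjacentValues, List.any_eq_true, PySem.Set.contains_iff,
    Bool.or_eq_true, PySem.Set.mem_ofList]
  constructor
  · rintro ⟨n, hn, h | h⟩
    · exact ⟨n - 1, by simpa using h, by simpa using hn⟩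
    · exact ⟨n, hn, h⟩
  · rintro ⟨a, ha, ha1⟩
    exact ⟨a, ha, Or.inr ha1⟩

theorem adjScan_zip_iff (v : List Int) (hv : v.Pairwise (· < ·)) :
    pvAdjScan (v.zip v.tail) = true ↔ ∃ a, a ∈ v ∧ a + 1 ∈ v := by
  induction v with
  | nil => simp [pvAdjScan]
  | cons x rest ih =>
    rcases rest with _ | ⟨h, t⟩
    · simp [pvAdjScan]
    · have hpw : (h :: t).Pairwise (· < ·) := hv.tail
      have hxlt : ∀ y ∈ h :: t, x < y := by
        intro y hy; exact (List.pairwise_cons.mp hv).1 y hy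
      simp only [List.tail_cons, List.zip_cons_cons, pvAdjScan]
      by_cases hcase : h - x = 1
      · simp only [hcase]
        refine ⟨fun _ => ⟨x, by simp, ?_⟩, fun _ => by simp⟩
        have : x + 1 = h := by omega
        simp [this]
      · have hne : (h - x == 1) = false := by simpa using hcase
        have ih' := ih hpw
        simp only [List.tail_cons] at ih'
        rw [hne, if_neg (by simp), ih']
        constructor
        · rintro ⟨a, ha, ha1⟩
          exact ⟨a, List.mem_cons_of_mem x ha, List.mem_cons_of_mem x ha1⟩
        · rintro ⟨a, ha, ha1⟩
          rcases List.mem_cons.mp ha with rfl | ha'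
          · -- a = x : then a+1 ∈ h :: t; minimality of h forces h = a+1, contradiction with hcase
            rcases List.mem_cons.mp ha1 with h1 | h1
            · omega
            · rcases List.mem_cons.mp h1 with rfl | h2
              · omega
              · have h1lt : h < a + 1 := (List.pairwise_cons.mp hpw).1 _ h2
                have := hxlt h (by simp)
                omega
          · rcases List.mem_cons.mp ha1 with h1 | h1
            · have := hxlt a ha'; omega
            · exact ⟨a, ha', h1⟩

-- ===== VERDICT (by name: the statement is the Claim_ definition above) =====
theorem hasAdjacentValues_spec : Claim_equal_hasAdjacentValues := by
  intro L _
  unfold Spec_hasAdjacentValues hasAdjacentValues_alt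
  set v := PySem.List.sorted (PySem.Set.ofList L) (fun x => x) false with hvdef
  have hpw : v.Pairwise (· < ·) := PySem.List.sorted_ofList_pairwise_lt L
  simp only [PySem.List.slice_from_one]
  have hmem : ∀ a : Int, a ∈ v ↔ a ∈ L := by
    intro a; rw [hvdef, PySem.List.mem_sorted, PySem.Set.mem_ofList]
  rcases hA : hasAdjacentValues L with _ | _
  · symm
    rw [← Bool.not_eq_true] at hA ⊢
    intro hc
    apply hA
    rw [portA_iff]
    obtain ⟨a, ha, ha1⟩ := (adjScan_zip_iff v hpw).mp hc
    exact ⟨a, (hmem a).mp ha, (hmem (a+1)).mp ha1⟩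
  · symm
    rw [adjScan_zip_iff v hpw]
    obtain ⟨a, ha, ha1⟩ := (portA_iff L).mp hA
    exact ⟨a, (hmem a).mpr ha, (hmem (a+1)).mpr ha1⟩
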